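-- pv_equiv track=rewrite | github.com/joeyshi12/advent-of-code | 2025/day09/soln2.py | contains_non_corner_red_tile
-- ===== SOURCE A (Python) =====
-- def contains_non_corner_red_tile(
--     x1: int,
--     y1: int,
--     x2: int,
--     y2: int,
--     red_tile_positions: list[list[int]]
-- ) -> bool:
--     left, right = min(x1, x2), max(x1, x2)
--     top, bottom = min(y1, y2), max(y1, y2)
--     for i in range(1, len(red_tile_positions)):
--         if not contains_point(red_tile_positions[i - 1], top, left, bottom, right):
--             continue
--         if not contains_point(red_tile_positions[i], top, left, bottom, right):
--             continue
--         if not contains_point(red_tile_positions[(i + 1) % len(red_tile_positions)], top, left, bottom, right):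
--             continue
--         x, y = red_tile_positions[i]
--         if (x == left or x == right) and (y == top or y == bottom):
--             continue
--         return True
--     return False
--
-- def contains_point(position: list[int], top: int, left: int, bottom: int, right: int) -> bool:
--     x, y = position
--     return x >= left and x <= right and y >= top and y <= bottom
-- ===== SOURCE B (Python) =====
-- def contains_non_corner_red_tile(
--     x1: int,
--     y1: int,
--     x2: int,
--     y2: int,
--     red_tile_positions: list[list[int]]
-- ) -> bool:
--     left, right = min(x1, x2), max(x1, x2)
--     top, bottom = min(y1, y2), max(y1, y2)
--     n = len(red_tile_positions)
--     inside = [left <= x <= right and top <= y <= bottom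
--               for x, y in red_tile_positions]
--
--     def non_corner(j):
--         x, y = red_tile_positions[j]
--         return not ((x == left or x == right) and (y == top or y == bottom))
--
--     i = 0
--     while i < n:
--         if not inside[i]:
--             i += 1
--             continue
--         s = i                         # start of a maximal run of inside points
--         while i < n and inside[i]:
--             i += 1
--         e = i - 1                     # end of that run
--         if any(non_corner(j) for j in range(s + 1, e)):
--             return True               # run-interior point: both neighbours in the run
--         if e == n - 1 and s < e and inside[0] and non_corner(e):
--             return True               # wraparound middle at the last index
--     return False
-- ===== Notes on version B (the rewrite author's own statement) =====
-- stated objective: alternative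
-- what changed: Replaces A's scan of every index triple (i-1, i, (i+1)%n) by a run decomposition: B finds each maximal run of consecutive in-rectangle points with a two-level while loop and answers from the run's interior points (both neighbours inside for free) plus the single wraparound middle when a run ends at the last index and position 0 is inside.
-- outside the precondition, e.g. on contains_non_corner_red_tile(0, 0, 0, 0, [[5, 5], [1, 2, 3]]): A returns False, B raises ValueError
import Mathlib
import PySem

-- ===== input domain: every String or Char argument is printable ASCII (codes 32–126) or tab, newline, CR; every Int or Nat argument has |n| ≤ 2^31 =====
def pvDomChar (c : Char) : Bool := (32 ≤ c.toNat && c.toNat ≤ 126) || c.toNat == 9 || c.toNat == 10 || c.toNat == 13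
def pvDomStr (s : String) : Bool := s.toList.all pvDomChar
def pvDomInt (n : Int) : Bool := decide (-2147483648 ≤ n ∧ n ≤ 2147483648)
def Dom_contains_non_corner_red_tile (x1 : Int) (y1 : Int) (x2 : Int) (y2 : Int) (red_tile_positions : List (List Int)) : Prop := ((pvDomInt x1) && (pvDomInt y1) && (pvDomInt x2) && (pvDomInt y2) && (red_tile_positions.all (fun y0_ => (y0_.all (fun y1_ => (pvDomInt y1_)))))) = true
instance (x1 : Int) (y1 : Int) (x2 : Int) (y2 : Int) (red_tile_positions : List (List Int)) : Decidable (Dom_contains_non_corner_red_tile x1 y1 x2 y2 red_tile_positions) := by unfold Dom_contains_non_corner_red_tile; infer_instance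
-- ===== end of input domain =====

-- B replaces A's circular scan of index triples by a run decomposition: it finds the maximal
-- runs of consecutive in-rectangle points and answers from each run's interior (plus the
-- single wraparound middle at the last index); objective: alternative, same O(n) cost.

-- ===== PORT A =====
-- contains_point(position, top, left, bottom, right); the `_ => false` arm is Python's
-- ValueError on unpacking a list whose length ≠ 2 — unreachable under Pre_.
def pvContainsPoint (position : List Int) (top left bottom right : Int) : Bool :=
  match position with
  | [x, y] => decide (x ≥ left) && decide (x ≤ right) && decide (y ≥ top) && decide (y ≤ bottom)
  | _ => false

-- the `for i in range(1, len(...))` loop with its early return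
def pvLoopA (pts : List (List Int)) (top left bottom right : Int) : List Int → Bool
  | [] => false
  | i :: rest =>
    if !pvContainsPoint (PySem.List.pyGetD pts (i - 1) []) top left bottom right then
      pvLoopA pts top left bottom right rest
    else if !pvContainsPoint (PySem.List.pyGetD pts i []) top left bottom right then
      pvLoopA pts top left bottom right rest
    else if !pvContainsPoint (PySem.List.pyGetD pts (PySem.Int.mod (i + 1) (pts.length : Int)) []) top left bottom right then
      pvLoopA pts top left bottom right rest
    else
      match PySem.List.pyGetD pts i [] with
      | [x, y] =>
        if (x == left || x == right) && (y == top || y == bottom) then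
          pvLoopA pts top left bottom right rest
        else true
      | _ => false   -- Python raises ValueError here; unreachable under Pre_

def contains_non_corner_red_tile (x1 : Int) (y1 : Int) (x2 : Int) (y2 : Int) (red_tile_positions : List (List Int)) : Bool :=
  let left := min x1 x2
  let right := max x1 x2
  let top := min y1 y2
  let bottom := max y1 y2
  pvLoopA red_tile_positions top left bottom right
    (PySem.List.pyRange 1 (red_tile_positions.length : Int) 1)

-- ===== PORT B =====
-- the comprehension's body; `_ => false` is the unpacking ValueError, unreachable under Pre_
def pvInsideFlag (left right top bottom : Int) (p : List Int) : Bool :=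
  match p with
  | [x, y] => decide (left ≤ x) && decide (x ≤ right) && decide (top ≤ y) && decide (y ≤ bottom)
  | _ => false

-- the local closure `non_corner(j)`; `_ => false` is the unpacking ValueError, unreachable under Pre_
def pvNonCornerP (left right top bottom : Int) (p : List Int) : Bool :=
  match p with
  | [x, y] => !((x == left || x == right) && (y == top || y == bottom))
  | _ => false

def pvNC (pts : List (List Int)) (left right top bottom : Int) (j : Nat) : Bool :=
  pvNonCornerP left right top bottom (pts.getD j [])

-- the inner `while i < n and inside[i]` loop: the value of i when it stops.
-- `fuel` only bounds the iteration count to make the loop total; it is called with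
-- fuel = n - i, which the loop (i strictly increasing) never exhausts.
def pvFindEnd (n : Nat) (inside : List Bool) : Nat → Nat → Nat
  | 0, i => i
  | fuel + 1, i =>
    if i < n then
      if inside.getD i false then pvFindEnd n inside fuel (i + 1) else i
    else i

-- the outer `while i < n` loop with its early returns; same fuel convention (i strictly
-- increases on every iteration, so fuel = n at i = 0 is never exhausted)
def pvOuterB (pts : List (List Int)) (n : Nat) (inside : List Bool)
    (left right top bottom : Int) : Nat → Nat → Bool
  | 0, _ => false
  | fuel + 1, i =>
    if i < n then
      if !(inside.getD i false) then
        pvOuterB pts n inside left right top bottom fuel (i + 1)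
      else
        -- s = i; the inner while loop leaves i = pvFindEnd n inside (n - i) i; e = that - 1
        let e1 := pvFindEnd n inside (n - i) i
        let e := e1 - 1
        if (List.range' (i + 1) (e - (i + 1))).any (pvNC pts left right top bottom) then true
        else if e == n - 1 && decide (i < e) && inside.getD 0 false && pvNC pts left right top bottom e then
          true
        else pvOuterB pts n inside left right top bottom fuel e1
    else false

def contains_non_corner_red_tile_alt (x1 : Int) (y1 : Int) (x2 : Int) (y2 : Int) (red_tile_positions : List (List Int)) : Bool :=
  let left := min x1 x2
  let right := max x1 x2
  let top := min y1 y2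
  let bottom := max y1 y2
  let n := red_tile_positions.length
  let inside := red_tile_positions.map (pvInsideFlag left right top bottom)
  pvOuterB red_tile_positions n inside left right top bottom n 0

-- ===== PRECONDITION & SPEC =====
-- Pre_ excludes lists containing an inner list whose length is not 2: on those Python A
-- raises ValueError when the tuple unpacking reaches them (and B always does).
def Pre_contains_non_corner_red_tile (x1 : Int) (y1 : Int) (x2 : Int) (y2 : Int) (red_tile_positions : List (List Int)) : Prop :=
  ∀ p ∈ red_tile_positions, p.length = 2
instance (x1 : Int) (y1 : Int) (x2 : Int) (y2 : Int) (red_tile_positions : List (List Int)) : Decidable (Pre_contains_non_corner_red_tile x1 y1 x2 y2 red_tile_positions) := by unfold Pre_contains_non_corner_red_tile; infer_instance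

def pvWitness_contains_non_corner_red_tile : Int × Int × Int × Int × List (List Int) :=
  (0, 0, 3, 3, [[1, 1], [2, 1], [1, 2]])

def Spec_contains_non_corner_red_tile (x1 : Int) (y1 : Int) (x2 : Int) (y2 : Int) (red_tile_positions : List (List Int)) (out : Bool) : Prop := out = contains_non_corner_red_tile_alt x1 y1 x2 y2 red_tile_positions
instance (x1 : Int) (y1 : Int) (x2 : Int) (y2 : Int) (red_tile_positions : List (List Int)) (out : Bool) : Decidable (Spec_contains_non_corner_red_tile x1 y1 x2 y2 red_tile_positions out) := by unfold Spec_contains_non_corner_red_tile; infer_instance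

-- ===== CLAIM (what is proved, stated in full; the proofs are below) =====
def Claim_equal_contains_non_corner_red_tile : Prop := ∀ (x1 : Int) (y1 : Int) (x2 : Int) (y2 : Int) (red_tile_positions : List (List Int)), Dom_contains_non_corner_red_tile x1 y1 x2 y2 red_tile_positions → Pre_contains_non_corner_red_tile x1 y1 x2 y2 red_tile_positions → Spec_contains_non_corner_red_tile x1 y1 x2 y2 red_tile_positions (contains_non_corner_red_tile x1 y1 x2 y2 red_tile_positions)

-- ===== LEMMAS AND PROOFS =====

-- the combined per-index test of A's loop body
def pvP (pts : List (List Int)) (top left bottom right : Int) (i : Int) : Bool :=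
  pvContainsPoint (PySem.List.pyGetD pts (i - 1) []) top left bottom right &&
  pvContainsPoint (PySem.List.pyGetD pts i []) top left bottom right &&
  pvContainsPoint (PySem.List.pyGetD pts (PySem.Int.mod (i + 1) (pts.length : Int)) []) top left bottom right &&
  pvNonCornerP left right top bottom (PySem.List.pyGetD pts i [])

-- the same test with Nat indexing, common reduct of both programs
def pvQ (pts : List (List Int)) (top left bottom right : Int) (k : Nat) : Bool :=
  pvContainsPoint (pts.getD k []) top left bottom right &&
  pvContainsPoint (pts.getD (k + 1) []) top left bottom right &&
  pvContainsPoint (pts.getD ((k + 2) % pts.length) []) top left bottom right &&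
  pvNonCornerP left right top bottom (pts.getD (k + 1) [])

lemma pvLoopA_eq_any (pts : List (List Int)) (top left bottom right : Int)
    (hlen : ∀ p ∈ pts, p.length = 2) (idxs : List Int)
    (hidx : ∀ i ∈ idxs, 1 ≤ i ∧ i < (pts.length : Int)) :
    pvLoopA pts top left bottom right idxs = idxs.any (pvP pts top left bottom right) := by
  induction idxs with
  | nil => rfl
  | cons i rest ih =>
    have hi := hidx i (List.mem_cons_self ..)
    have hrest : ∀ j ∈ rest, 1 ≤ j ∧ j < (pts.length : Int) :=
      fun j hj => hidx j (List.mem_cons_of_mem _ hj)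
    have hmem : PySem.List.pyGetD pts i [] ∈ pts :=
      PySem.List.pyGetD_mem pts [] ⟨by omega, by omega⟩
    obtain ⟨x, y, hxy⟩ := List.length_eq_two.mp (hlen _ hmem)
    simp only [pvLoopA, List.any_cons, ih hrest, pvP, hxy, pvNonCornerP]
    by_cases h1 : pvContainsPoint (PySem.List.pyGetD pts (i - 1) []) top left bottom right
    · by_cases hb : pvContainsPoint [x, y] top left bottom right
      · by_cases h3 : pvContainsPoint
            (PySem.List.pyGetD pts (PySem.Int.mod (i + 1) (pts.length : Int)) []) top left bottom right
        · by_cases hc : ((x == left || x == right) && (y == top || y == bottom)) = true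
          · simp [h1, hb, h3, hc]
          · simp [h1, hb, h3, hc]
        · simp [h1, hb, h3]
      · simp [h1, hb]
    · simp [h1]

lemma pvP_eq_pvQ (pts : List (List Int)) (top left bottom right : Int) (k : Nat) :
    pvP pts top left bottom right ((k : Int) + 1) = pvQ pts top left bottom right k := by
  have g1 : PySem.List.pyGetD pts ((k : Int) + 1 - 1) [] = pts.getD k [] := by
    rw [show ((k : Int) + 1 - 1) = ((k : Nat) : Int) by omega, PySem.List.pyGetD_natCast]
  have g2 : PySem.List.pyGetD pts ((k : Int) + 1) [] = pts.getD (k + 1) [] := by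
    rw [show ((k : Int) + 1) = ((k + 1 : Nat) : Int) by push_cast; ring, PySem.List.pyGetD_natCast]
  have g3 : PySem.List.pyGetD pts (PySem.Int.mod ((k : Int) + 1 + 1) (pts.length : Int)) []
      = pts.getD ((k + 2) % pts.length) [] := by
    rw [show ((k : Int) + 1 + 1) = ((k + 2 : Nat) : Int) by push_cast; ring,
      PySem.Int.mod_natCast, PySem.List.pyGetD_natCast]
  unfold pvP pvQ
  rw [g1, g2, g3]

lemma pvA_iff (x1 y1 x2 y2 : Int) (pts : List (List Int))
    (hlen : ∀ p ∈ pts, p.length = 2) :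
    contains_non_corner_red_tile x1 y1 x2 y2 pts = true ↔
      ∃ k : Nat, k + 1 < pts.length ∧
        pvQ pts (min y1 y2) (min x1 x2) (max y1 y2) (max x1 x2) k = true := by
  unfold contains_non_corner_red_tile
  rw [pvLoopA_eq_any pts _ _ _ _ hlen _
    (fun i hi => (PySem.List.mem_pyRange_one.mp hi))]
  simp only [List.any_eq_true, PySem.List.mem_pyRange_one]
  constructor
  · rintro ⟨i, ⟨h1, h2⟩, hP⟩
    refine ⟨(i - 1).toNat, by omega, ?_⟩
    rw [← pvP_eq_pvQ]
    have hi : (((i - 1).toNat : Nat) : Int) + 1 = i := by omega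
    rwa [hi]
  · rintro ⟨k, hk, hQ⟩
    exact ⟨(k : Int) + 1, ⟨by omega, by omega⟩, by rw [pvP_eq_pvQ]; exact hQ⟩

-- the membership table agrees with A's contains_point on in-range indices
lemma pvInside_getD (pts : List (List Int)) (left right top bottom : Int) (j : Nat)
    (hj : j < pts.length) :
    (pts.map (pvInsideFlag left right top bottom)).getD j false
      = pvContainsPoint (pts.getD j []) top left bottom right := by
  rw [List.getD_eq_getElem _ _ (by simpa using hj), List.getElem_map,
    List.getD_eq_getElem _ _ hj]
  rcases pts[j] with _ | ⟨x, _ | ⟨y, _ | _⟩⟩ <;> rfl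

-- specification of the inner while loop
lemma pvFindEnd_ge (n : Nat) (inside : List Bool) (fuel i : Nat) :
    i ≤ pvFindEnd n inside fuel i := by
  induction fuel generalizing i with
  | zero => exact Nat.le_refl i
  | succ fuel ih =>
    simp only [pvFindEnd]
    split
    · split
      · exact Nat.le_of_succ_le (ih (i + 1))
      · exact Nat.le_refl i
    · exact Nat.le_refl i

lemma pvFindEnd_gt (n : Nat) (inside : List Bool) (fuel i : Nat) (hfuel : n - i ≤ fuel)
    (h : i < n) (h2 : inside.getD i false = true) : i < pvFindEnd n inside fuel i := by
  cases fuel with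
  | zero => omega
  | succ fuel =>
    simp only [pvFindEnd, if_pos h, h2, if_true]
    exact Nat.lt_of_lt_of_le (Nat.lt_succ_self i) (pvFindEnd_ge n inside fuel (i + 1))

-- specification of the inner while loop (fuel = n - i suffices)
lemma pvFindEnd_spec (n : Nat) (inside : List Bool) (fuel i : Nat) (hi : i ≤ n)
    (hfuel : n - i ≤ fuel) :
    pvFindEnd n inside fuel i ≤ n ∧
    (∀ j, i ≤ j → j < pvFindEnd n inside fuel i → inside.getD j false = true) ∧
    (pvFindEnd n inside fuel i = n ∨ inside.getD (pvFindEnd n inside fuel i) false = false) := by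
  induction fuel generalizing i with
  | zero =>
    have hin : i = n := by omega
    simp only [pvFindEnd]
    exact ⟨by omega, fun j hj1 hj2 => absurd hj1 (by omega), Or.inl hin⟩
  | succ fuel ih =>
    simp only [pvFindEnd]
    split
    · split
      · rename_i h h2
        obtain ⟨ha, hb, hc⟩ := ih (i + 1) (by omega) (by omega)
        refine ⟨ha, ?_, hc⟩
        intro j hj1 hj2
        rcases Nat.eq_or_lt_of_le hj1 with rfl | hj1'
        · exact h2
        · exact hb j hj1' hj2
      · rename_i h h2
        exact ⟨hi, fun j hj1 hj2 => absurd hj1 (by omega), Or.inr (by simpa using h2)⟩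
    · rename_i h
      exact ⟨by omega, fun j hj1 hj2 => absurd hj1 (by omega), Or.inl (by omega)⟩

-- main invariant of the outer loop: called at i with no run crossing into position i from
-- the left (i = 0, or inside[i-1] is false, or inside[i] is false), it finds exactly the
-- valid middles at positions ≥ i
lemma pvOuterB_iff (pts : List (List Int)) (left right top bottom : Int) (fuel i : Nat)
    (hi : i ≤ pts.length) (hfuel : pts.length - i ≤ fuel)
    (hyp : i = 0 ∨ (pts.map (pvInsideFlag left right top bottom)).getD (i - 1) false = false
         ∨ (pts.map (pvInsideFlag left right top bottom)).getD i false = false) :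
    pvOuterB pts pts.length (pts.map (pvInsideFlag left right top bottom)) left right top bottom fuel i = true
      ↔ ∃ k : Nat, k + 1 < pts.length ∧ i ≤ k + 1 ∧ pvQ pts top left bottom right k = true := by
  induction fuel generalizing i with
  | zero =>
    exact iff_of_false (by simp [pvOuterB]) (by rintro ⟨k, hk, hik, -⟩; omega)
  | succ fuel ih => ?_
  simp only [pvOuterB]
  by_cases h : i < pts.length
  case neg =>
    rw [if_neg h]
    exact iff_of_false (by decide) (by rintro ⟨k, hk, hik, -⟩; omega)
  rw [if_pos h]
  by_cases h2 : (pts.map (pvInsideFlag left right top bottom)).getD i false = true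
  case neg =>
    -- inside[i] is false: the outer loop just advances
    have h2' : (pts.map (pvInsideFlag left right top bottom)).getD i false = false := by
      simpa using h2
    rw [if_pos (by rw [h2']; rfl)]
    rw [ih (i + 1) (by omega) (by omega) (Or.inr (Or.inl (by simpa using h2')))]
    constructor
    · rintro ⟨k, hk, hik, hQ⟩
      exact ⟨k, hk, by omega, hQ⟩
    · rintro ⟨k, hk, hik, hQ⟩
      refine ⟨k, hk, ?_, hQ⟩
      by_contra hlt
      have hki : k + 1 = i := by omega
      simp only [pvQ, Bool.and_eq_true] at hQ
      obtain ⟨⟨⟨-, q2⟩, -⟩, -⟩ := hQ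
      rw [hki, ← pvInside_getD pts left right top bottom i h] at q2
      rw [h2'] at q2
      exact Bool.false_ne_true q2
  -- inside[i] is true: a maximal run starts at i
  rw [if_neg (by rw [h2]; decide)]
  obtain ⟨he1n, hrun, hend⟩ := pvFindEnd_spec pts.length
    (pts.map (pvInsideFlag left right top bottom)) (pts.length - i) i hi (Nat.le_refl _)
  have hgt : i < pvFindEnd pts.length (pts.map (pvInsideFlag left right top bottom)) (pts.length - i) i :=
    pvFindEnd_gt _ _ _ _ (Nat.le_refl _) h h2
  by_cases hc1 : (List.range' (i + 1)
      (pvFindEnd pts.length (pts.map (pvInsideFlag left right top bottom)) (pts.length - i) i - 1 - (i + 1))).any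
      (pvNC pts left right top bottom) = true
  · rw [if_pos hc1]
    simp only [true_iff]
    simp only [List.any_eq_true, List.mem_range'_1] at hc1
    obtain ⟨j, ⟨hj1, hj2⟩, hnc⟩ := hc1
    have hje : j < pvFindEnd pts.length (pts.map (pvInsideFlag left right top bottom)) (pts.length - i) i - 1 := by omega
    refine ⟨j - 1, by omega, by omega, ?_⟩
    have e1 : j - 1 + 1 = j := by omega
    have e2 : j - 1 + 2 = j + 1 := by omega
    simp only [pvQ, Bool.and_eq_true, e1, e2]
    refine ⟨⟨⟨?_, ?_⟩, ?_⟩, ?_⟩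
    · rw [← pvInside_getD pts left right top bottom (j - 1) (by omega)]
      exact hrun (j - 1) (by omega) (by omega)
    · rw [← pvInside_getD pts left right top bottom j (by omega)]
      exact hrun j (by omega) (by omega)
    · rw [Nat.mod_eq_of_lt (by omega)]
      rw [← pvInside_getD pts left right top bottom (j + 1) (by omega)]
      exact hrun (j + 1) (by omega) (by omega)
    · exact hnc
  · rw [if_neg hc1]
    by_cases hc2 : (pvFindEnd pts.length (pts.map (pvInsideFlag left right top bottom)) (pts.length - i) i - 1
          == pts.length - 1
        && decide (i < pvFindEnd pts.length (pts.map (pvInsideFlag left right top bottom)) (pts.length - i) i - 1)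
        && (pts.map (pvInsideFlag left right top bottom)).getD 0 false
        && pvNC pts left right top bottom
          (pvFindEnd pts.length (pts.map (pvInsideFlag left right top bottom)) (pts.length - i) i - 1)) = true
    · rw [if_pos hc2]
      simp only [true_iff]
      simp only [Bool.and_eq_true, beq_iff_eq, decide_eq_true_eq] at hc2
      obtain ⟨⟨⟨hEn, hIe⟩, h0⟩, hncE⟩ := hc2
      have hE : pvFindEnd pts.length (pts.map (pvInsideFlag left right top bottom)) (pts.length - i) i = pts.length := by
        omega
      refine ⟨pts.length - 2, by omega, by omega, ?_⟩
      have e1 : pts.length - 2 + 1 = pts.length - 1 := by omega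
      have e2 : pts.length - 2 + 2 = pts.length := by omega
      simp only [pvQ, Bool.and_eq_true, e1, e2, Nat.mod_self]
      refine ⟨⟨⟨?_, ?_⟩, ?_⟩, ?_⟩
      · rw [← pvInside_getD pts left right top bottom (pts.length - 2) (by omega)]
        exact hrun (pts.length - 2) (by omega) (by omega)
      · rw [← pvInside_getD pts left right top bottom (pts.length - 1) (by omega)]
        exact hrun (pts.length - 1) (by omega) (by omega)
      · rw [← pvInside_getD pts left right top bottom 0 (by omega)]
        exact h0
      · rw [show pts.length - 1
            = pvFindEnd pts.length (pts.map (pvInsideFlag left right top bottom)) (pts.length - i) i - 1 by omega]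
        exact hncE
    · rw [if_neg hc2]
      have hgetDe1 : (pts.map (pvInsideFlag left right top bottom)).getD
          (pvFindEnd pts.length (pts.map (pvInsideFlag left right top bottom)) (pts.length - i) i) false = false := by
        rcases hend with hEn | hF
        · rw [hEn]
          exact List.getD_eq_default _ _ (by simp)
        · exact hF
      rw [ih (pvFindEnd pts.length (pts.map (pvInsideFlag left right top bottom)) (pts.length - i) i)
        he1n (by omega) (Or.inr (Or.inr hgetDe1))]
      constructor
      · rintro ⟨k, hk, hik, hQ⟩
        exact ⟨k, hk, by omega, hQ⟩
      · rintro ⟨k, hk, hik, hQ⟩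
        refine ⟨k, hk, ?_, hQ⟩
        by_contra hlt
        -- j := k + 1 < e1: show it would already have fired
        simp only [pvQ, Bool.and_eq_true] at hQ
        obtain ⟨⟨⟨q1, q2⟩, q3⟩, q4⟩ := hQ
        by_cases hji : k + 1 = i
        · -- middle at i needs inside[i-1]; excluded by hyp
          rcases hyp with h0 | hL | hR
          · omega
          · rw [show k = i - 1 by omega,
              ← pvInside_getD pts left right top bottom (i - 1) (by omega), hL] at q1
            exact Bool.false_ne_true q1
          · rw [h2] at hR
            exact Bool.false_ne_true hR.symm
        by_cases hje : k + 1 < pvFindEnd pts.length (pts.map (pvInsideFlag left right top bottom)) (pts.length - i) i - 1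
        · -- run-interior middle: contradicts hc1
          apply hc1
          simp only [List.any_eq_true, List.mem_range'_1]
          exact ⟨k + 1, ⟨by omega, by omega⟩, q4⟩
        · -- middle at the run's last index
          have hjE : k + 1 = pvFindEnd pts.length (pts.map (pvInsideFlag left right top bottom)) (pts.length - i) i - 1 := by
            omega
          have hk2 : k + 2 = pvFindEnd pts.length (pts.map (pvInsideFlag left right top bottom)) (pts.length - i) i := by
            omega
          by_cases hEn : pvFindEnd pts.length (pts.map (pvInsideFlag left right top bottom)) (pts.length - i) i = pts.length
          · -- wraparound middle: contradicts hc2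
            apply hc2
            simp only [Bool.and_eq_true, beq_iff_eq, decide_eq_true_eq]
            refine ⟨⟨⟨by omega, by omega⟩, ?_⟩, ?_⟩
            · rw [hk2, hEn, Nat.mod_self] at q3
              rw [← pvInside_getD pts left right top bottom 0 (by omega)] at q3
              exact q3
            · rw [← hjE]
              exact q4
          · -- the point after the run is outside: contradicts q3
            rw [hk2, Nat.mod_eq_of_lt (by omega)] at q3
            rw [← pvInside_getD pts left right top bottom _ (by omega)] at q3
            rw [hgetDe1] at q3
            exact Bool.false_ne_true q3

lemma pvB_iff (x1 y1 x2 y2 : Int) (pts : List (List Int)) :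
    contains_non_corner_red_tile_alt x1 y1 x2 y2 pts = true ↔
      ∃ k : Nat, k + 1 < pts.length ∧
        pvQ pts (min y1 y2) (min x1 x2) (max y1 y2) (max x1 x2) k = true := by
  unfold contains_non_corner_red_tile_alt
  rw [pvOuterB_iff pts _ _ _ _ pts.length 0 (Nat.zero_le _) (Nat.sub_le _ _) (Or.inl rfl)]
  simp

-- ===== VERDICT (by name: the statement is the Claim_ definition above) =====
theorem contains_non_corner_red_tile_spec : Claim_equal_contains_non_corner_red_tile := by
  intro x1 y1 x2 y2 pts _ hpre
  unfold Spec_contains_non_corner_red_tile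
  rw [Bool.eq_iff_iff, pvA_iff x1 y1 x2 y2 pts hpre, pvB_iff x1 y1 x2 y2 pts]
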